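-- pv_equiv track=rewrite | github.com/amrit110/aoc | 2019/day4/solve.py | has_two_adjacent_exclusive
-- ===== SOURCE A (Python) =====
-- def has_two_adjacent_exclusive(pw):
--     pw = str(pw)
--
--     unique = set(pw)
--     for u in unique:
--         occ = [pos for pos, i in enumerate(pw) if i == u]
--         if (len(occ) == 2) and (occ[0] + 1 == occ[1]):
--             return True
--
--     return False
-- ===== SOURCE B (Python) =====
-- def has_two_adjacent_exclusive(pw):
--     s = str(pw)
--     counts = {}
--     for ch in s:
--         counts[ch] = counts.get(ch, 0) + 1
--     for i in range(len(s) - 1):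
--         if s[i] == s[i + 1] and counts[s[i]] == 2:
--             return True
--     return False
-- ===== Notes on version B (the rewrite author's own statement) =====
-- stated objective: simpler
-- what changed: Replaces the per-unique-digit position-list construction (a full scan of the string for every distinct character) by one counting pass building a dict plus one adjacency scan over index pairs, preserving the exact 'appears exactly twice AND adjacently' semantics.
import Mathlib
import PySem

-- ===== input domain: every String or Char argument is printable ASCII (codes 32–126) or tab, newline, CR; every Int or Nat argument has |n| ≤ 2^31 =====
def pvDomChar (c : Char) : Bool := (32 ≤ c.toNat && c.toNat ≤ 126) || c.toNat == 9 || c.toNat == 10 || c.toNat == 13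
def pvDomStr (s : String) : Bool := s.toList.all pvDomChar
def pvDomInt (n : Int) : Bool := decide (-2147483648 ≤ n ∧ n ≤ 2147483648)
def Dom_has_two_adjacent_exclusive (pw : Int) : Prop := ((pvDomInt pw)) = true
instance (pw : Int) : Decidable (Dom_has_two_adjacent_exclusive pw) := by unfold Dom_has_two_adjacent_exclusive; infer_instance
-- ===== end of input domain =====

-- B replaces A's per-unique-character position-list scans (one full scan per distinct character) by one counting pass into a dict plus one adjacency scan; same exact semantics, simpler decomposition.


-- ===== PORT A =====
-- for each unique character u of str(pw): occ = list of positions of u; True iff len(occ)==2 and occ[0]+1==occ[1].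
-- The loop's result is an 'any' over the set (True iff some u qualifies), so it does not depend on Python's set iteration order.
-- occ[0]/occ[1] are guarded by len(occ)==2 ('and' short-circuits), so pyGetD with a dummy default is exact there.
def has_two_adjacent_exclusive (pw : Int) : Bool :=
  let s := PySem.Int.toChars pw
  let unique := PySem.Set.ofList s
  unique.any (fun u =>
    let occ := ((PySem.List.enumerate s 0).filter (fun p => p.2 == u)).map (fun p => p.1)
    decide (occ.length = 2) && (PySem.List.pyGetD occ 0 0 + 1 == PySem.List.pyGetD occ 1 0))

-- ===== PORT B =====
-- one counting pass over str(pw) into a dict, then one scan over adjacent index pairs; the indexing s[i], s[i+1] is in range for i in range(len(s)-1).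
def has_two_adjacent_exclusive_alt (pw : Int) : Bool :=
  let s := PySem.Int.toChars pw
  let counts := s.foldl (fun d ch => PySem.Dict.insert d ch (PySem.Dict.getD d ch 0 + 1)) (PySem.Dict.empty : PySem.Dict Char Int)
  (PySem.List.pyRange 0 ((s.length : Int) - 1) 1).any (fun i =>
    (PySem.List.pyGetD s i ' ' == PySem.List.pyGetD s (i + 1) ' ') &&
    (PySem.Dict.getD counts (PySem.List.pyGetD s i ' ') 0 == 2))

-- ===== PRECONDITION & SPEC =====
def Spec_has_two_adjacent_exclusive (pw : Int) (out : Bool) : Prop := out = has_two_adjacent_exclusive_alt pw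
instance (pw : Int) (out : Bool) : Decidable (Spec_has_two_adjacent_exclusive pw out) := by unfold Spec_has_two_adjacent_exclusive; infer_instance

-- ===== CLAIM (what is proved, stated in full; the proofs are below) =====
def Claim_equal_has_two_adjacent_exclusive : Prop := ∀ (pw : Int), Dom_has_two_adjacent_exclusive pw → Spec_has_two_adjacent_exclusive pw (has_two_adjacent_exclusive pw)

-- ===== LEMMAS AND PROOFS =====

-- pvOcc l u is the position list A builds for character u
def pvOcc (l : List Char) (u : Char) : List Int :=
  ((PySem.List.enumerate l 0).filter (fun p => p.2 == u)).map (fun p => p.1)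

theorem pvOcc_mem (l : List Char) (u : Char) (j : Int) :
    j ∈ pvOcc l u ↔ ∃ (k : Nat) (_ : k < l.length), j = (k : Int) ∧ l[k] = u := by
  simp [pvOcc, List.mem_map, List.mem_filter, PySem.List.mem_enumerate_iff]

theorem countP_enumerate (l : List Char) (u : Char) : ∀ s : Int,
    ((PySem.List.enumerate l s).countP (fun p => p.2 == u)) = l.count u := by
  induction l with
  | nil => intro s; simp [PySem.List.enumerate_nil]
  | cons x t ih =>
    intro s
    simp [PySem.List.enumerate_cons, List.countP_cons, List.count_cons, ih]

theorem pvOcc_length (l : List Char) (u : Char) : (pvOcc l u).length = l.count u := by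
  rw [pvOcc, List.length_map, ← List.countP_eq_length_filter]
  exact countP_enumerate l u 0

theorem pvOcc_pairwise (l : List Char) (u : Char) : (pvOcc l u).Pairwise (· < ·) := by
  exact List.Pairwise.map _ (fun a b h => h)
    (((PySem.List.pairwise_lt_enumerate l 0).sublist List.filter_sublist))

theorem condA_iff (l : List Char) (u : Char) :
    (decide ((pvOcc l u).length = 2) && (PySem.List.pyGetD (pvOcc l u) 0 0 + 1 == PySem.List.pyGetD (pvOcc l u) 1 0)) = true
    ↔ ∃ a : Int, pvOcc l u = [a, a + 1] := by
  constructor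
  · rintro h
    simp only [Bool.and_eq_true, decide_eq_true_eq, beq_iff_eq] at h
    obtain ⟨h2, heq⟩ := h
    obtain ⟨a, b, hab⟩ := List.length_eq_two.mp h2
    rw [hab] at heq
    simp [PySem.List.pyGetD] at heq
    exact ⟨a, by rw [hab, heq]⟩
  · rintro ⟨a, ha⟩
    rw [ha]
    simp [PySem.List.pyGetD]

theorem pv_key (l : List Char) :
    ((PySem.Set.ofList l).any (fun u =>
      let occ := ((PySem.List.enumerate l 0).filter (fun p => p.2 == u)).map (fun p => p.1)
      decide (occ.length = 2) && (PySem.List.pyGetD occ 0 0 + 1 == PySem.List.pyGetD occ 1 0)))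
    = ((PySem.List.pyRange 0 ((l.length : Int) - 1) 1).any (fun i =>
      (PySem.List.pyGetD l i ' ' == PySem.List.pyGetD l (i + 1) ' ') &&
      (PySem.Dict.getD (l.foldl (fun d ch => PySem.Dict.insert d ch (PySem.Dict.getD d ch 0 + 1)) (PySem.Dict.empty : PySem.Dict Char Int)) (PySem.List.pyGetD l i ' ') 0 == 2))) := by
  have hgetd : ∀ v : Char, PySem.Dict.getD (l.foldl (fun d ch => PySem.Dict.insert d ch (PySem.Dict.getD d ch 0 + 1)) (PySem.Dict.empty : PySem.Dict Char Int)) v 0 = (l.count v : Int) :=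
    fun v => PySem.Dict.getD_counter l v
  rw [Bool.eq_iff_iff]
  simp only [List.any_eq_true]
  constructor
  · rintro ⟨u, hu, hcond⟩
    rw [PySem.Set.mem_ofList] at hu
    rw [show ((PySem.List.enumerate l 0).filter (fun p => p.2 == u)).map (fun p => p.1) = pvOcc l u from rfl] at hcond
    obtain ⟨a, ha⟩ := (condA_iff l u).mp hcond
    have hmem_a : a ∈ pvOcc l u := by rw [ha]; simp
    have hmem_b : a + 1 ∈ pvOcc l u := by rw [ha]; simp
    obtain ⟨k, hk, hak, hku⟩ := (pvOcc_mem l u a).mp hmem_a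
    obtain ⟨k2, hk2, hak2, hk2u⟩ := (pvOcc_mem l u (a+1)).mp hmem_b
    refine ⟨a, ?_, ?_⟩
    · rw [PySem.List.mem_pyRange_one]; omega
    · have h0a : 0 ≤ a := by omega
      have hlt : a < (l.length : Int) := by omega
      have hlt1 : a + 1 < (l.length : Int) := by omega
      rw [PySem.List.pyGetD_eq_getElem l ' ' h0a hlt, PySem.List.pyGetD_eq_getElem l ' ' (by omega) hlt1]
      have h1 : a.toNat = k := by omega
      have h2 : (a+1).toNat = k2 := by omega
      simp only [h1, h2, hku, hk2u]
      have hcnt : l.count u = 2 := by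
        have := pvOcc_length l u
        rw [ha] at this; simpa using this.symm
      simp only [hgetd, hcnt]
      simp
  · rintro ⟨i, hi, hcond⟩
    rw [PySem.List.mem_pyRange_one] at hi
    obtain ⟨h0, hlt⟩ := hi
    have hlt1 : i + 1 < (l.length : Int) := by omega
    rw [PySem.List.pyGetD_eq_getElem l ' ' h0 (by omega), PySem.List.pyGetD_eq_getElem l ' ' (by omega) hlt1] at hcond
    simp only [Bool.and_eq_true, beq_iff_eq] at hcond
    obtain ⟨heq, hcnt⟩ := hcond
    rw [hgetd] at hcnt
    have hcnt2 : l.count (l[i.toNat]'(by omega)) = 2 := by exact_mod_cast hcnt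
    have hki : (i+1).toNat = i.toNat + 1 := by omega
    set u := l[i.toNat]'(by omega) with hu
    have hknat : (i.toNat : Int) = i := by omega
    refine ⟨u, (by simp only [PySem.Set.mem_ofList]; exact hu ▸ List.getElem_mem _ : u ∈ PySem.Set.ofList l), ?_⟩
    rw [show ((PySem.List.enumerate l 0).filter (fun p => p.2 == u)).map (fun p => p.1) = pvOcc l u from rfl]
    apply (condA_iff l u).mpr
    refine ⟨i, ?_⟩
    have hlen2 : (pvOcc l u).length = 2 := by rw [pvOcc_length, hcnt2]
    obtain ⟨a, b, hab⟩ := List.length_eq_two.mp hlen2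
    have hpa : (· < ·) a b := by
      have := pvOcc_pairwise l u
      rw [hab] at this; simpa using this
    have hmi : i ∈ pvOcc l u := (pvOcc_mem l u i).mpr ⟨i.toNat, by omega, by omega, rfl⟩
    have hmi1 : i + 1 ∈ pvOcc l u := (pvOcc_mem l u (i+1)).mpr ⟨i.toNat + 1, by omega, by omega, by simp only [← hki]; exact heq.symm⟩
    rw [hab] at hmi hmi1
    simp at hmi hmi1
    have hib : a = i ∧ b = i + 1 := by
      rcases hmi with rfl | rfl <;> rcases hmi1 with h | h <;> exact ⟨by omega, by omega⟩
    rw [hab, hib.1, hib.2]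

-- ===== VERDICT (by name: the statement is the Claim_ definition above) =====
theorem has_two_adjacent_exclusive_spec : Claim_equal_has_two_adjacent_exclusive := by
  intro pw _
  unfold Spec_has_two_adjacent_exclusive has_two_adjacent_exclusive has_two_adjacent_exclusive_alt
  exact pv_key (PySem.Int.toChars pw)
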